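-- pv_equiv track=rewrite | github.com/muhammedfadera/Project-Euler | python/Problem-32.py | rep_digits
-- ===== SOURCE A (Python) =====
-- def rep_digits(str_num):
--       '''
--       Returns true is str_num has digit that is repeated more than onces. It checks
--       if the number of unique numbers is equal to the number of digits in the input
--       '''
--       unique_str = ''
--       l = 0
--       for i in str_num:
--             if i not in unique_str:
--                   unique_str += i
--                   l += 1
--       return len(str_num) != l
-- ===== SOURCE B (Python) =====
-- def rep_digits(str_num):
--     s = sorted(str_num)
--     return any(a == b for a, b in zip(s, s[1:]))
-- ===== Notes on version B (the rewrite author's own statement) =====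
-- stated objective: alternative
-- what changed: Replaces A's build-a-unique-string-with-inner-membership-scan and length comparison by a sort followed by a single adjacent-equal scan over consecutive pairs.
import Mathlib
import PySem

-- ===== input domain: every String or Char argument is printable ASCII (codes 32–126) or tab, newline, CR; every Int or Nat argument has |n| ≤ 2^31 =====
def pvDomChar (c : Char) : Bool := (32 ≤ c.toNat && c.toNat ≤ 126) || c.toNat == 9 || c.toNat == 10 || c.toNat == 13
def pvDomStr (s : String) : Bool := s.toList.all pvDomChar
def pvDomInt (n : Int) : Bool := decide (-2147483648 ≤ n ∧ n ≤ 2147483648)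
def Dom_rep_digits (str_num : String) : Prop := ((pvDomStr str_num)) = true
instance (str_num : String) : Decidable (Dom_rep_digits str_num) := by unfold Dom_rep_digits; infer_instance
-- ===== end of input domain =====

-- B sorts the characters and scans once for an adjacent equal pair, instead of A's
-- build-a-unique-string-with-membership-scan and length comparison (alternative decomposition).


-- ===== PORT A =====
-- for i in str_num: if i not in unique_str: unique_str += i; l += 1
def rep_digits (str_num : String) : Bool :=
  let r := str_num.toList.foldl
    (fun (st : List Char × Int) i =>
      if i ∈ st.1 then st else (st.1 ++ [i], st.2 + 1))
    ([], 0)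
  decide (PySem.Str.len str_num ≠ r.2)

-- ===== PORT B =====
-- s = sorted(str_num)
-- any(a == b for a, b in zip(s, s[1:]))
def pvAdjDup (s : List Char) : Bool :=
  (s.zip (PySem.List.slice s (some 1) none)).any (fun p => p.1 == p.2)

def rep_digits_alt (str_num : String) : Bool :=
  pvAdjDup (PySem.List.sorted str_num.toList (fun c => c) false)

-- ===== PRECONDITION & SPEC =====
def Spec_rep_digits (str_num : String) (out : Bool) : Prop := out = rep_digits_alt str_num
instance (str_num : String) (out : Bool) : Decidable (Spec_rep_digits str_num out) := by unfold Spec_rep_digits; infer_instance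

-- ===== CLAIM (what is proved, stated in full; the proofs are below) =====
def Claim_equal_rep_digits : Prop := ∀ (str_num : String), Dom_rep_digits str_num → Spec_rep_digits str_num (rep_digits str_num)

-- ===== LEMMAS AND PROOFS =====

-- A's fold carries the length of its first component in its second component.
lemma foldA_pair (xs : List Char) (u : List Char) (n : Int) (h : n = (u.length : Int)) :
    xs.foldl (fun (st : List Char × Int) i =>
      if i ∈ st.1 then st else (st.1 ++ [i], st.2 + 1)) (u, n)
    = (xs.foldl PySem.Set.add u, ((xs.foldl PySem.Set.add u).length : Int)) := by
  induction xs generalizing u n with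
  | nil => simp [h]
  | cons c t ih =>
    simp only [List.foldl_cons, PySem.Set.add, PySem.Set.contains]
    by_cases hc : c ∈ u
    · simpa [hc] using ih u n h
    · simpa [hc] using ih (u ++ [c]) (n + 1) (by simp [h])

-- length of the dedup fold equals old length + new length iff everything added was new & distinct
lemma add_of_mem (u : List Char) (c : Char) (hc : c ∈ u) : PySem.Set.add u c = u := by
  simp [PySem.Set.add, PySem.Set.contains, hc]

lemma add_of_not_mem (u : List Char) (c : Char) (hc : c ∉ u) :
    PySem.Set.add u c = u ++ [c] := by
  simp [PySem.Set.add, PySem.Set.contains, hc]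

lemma foldAdd_le (xs : List Char) (u : List Char) :
    (xs.foldl PySem.Set.add u).length ≤ u.length + xs.length := by
  induction xs generalizing u with
  | nil => simp
  | cons c t ih =>
    have h1 : (PySem.Set.add u c).length ≤ u.length + 1 := by
      by_cases hc : c ∈ u
      · rw [add_of_mem u c hc]; omega
      · rw [add_of_not_mem u c hc]; simp
    simp only [List.foldl_cons]
    exact le_trans (ih _) (by simp; omega)

lemma foldAdd_len_iff (xs : List Char) (u : List Char) :
    (xs.foldl PySem.Set.add u).length = u.length + xs.length ↔
      (xs.Nodup ∧ ∀ x ∈ xs, x ∉ u) := by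
  induction xs generalizing u with
  | nil => simp
  | cons c t ih =>
    simp only [List.foldl_cons]
    by_cases hc : c ∈ u
    · rw [add_of_mem u c hc]
      constructor
      · intro h
        exfalso
        have := foldAdd_le t u
        simp [List.length_cons] at h
        omega
      · rintro ⟨-, hall⟩
        exact absurd hc (hall c (List.mem_cons_self))
    · rw [add_of_not_mem u c hc]
      have : (t.foldl PySem.Set.add (u ++ [c])).length = (u ++ [c]).length + t.length ↔
          (t.Nodup ∧ ∀ x ∈ t, x ∉ u ++ [c]) := ih (u ++ [c])
      constructor
      · intro h
        have h' : (t.foldl PySem.Set.add (u ++ [c])).length = (u ++ [c]).length + t.length := by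
          simp [List.length_append] at h ⊢; omega
        obtain ⟨hnd, hall⟩ := this.mp h'
        refine ⟨List.nodup_cons.mpr ⟨fun hm => ?_, hnd⟩, ?_⟩
        · exact (hall c hm) (by simp)
        · intro x hx
          rcases List.mem_cons.mp hx with rfl | hx'
          · exact hc
          · intro hxu; exact (hall x hx') (by simp [hxu])
      · rintro ⟨hnd, hall⟩
        obtain ⟨hct, hndt⟩ := List.nodup_cons.mp hnd
        have h' := this.mpr ⟨hndt, by
          intro x hx
          simp only [List.mem_append, List.mem_singleton]
          rintro (hxu | rfl)
          · exact (hall x (List.mem_cons_of_mem _ hx)) hxu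
          · exact hct hx⟩
        simp [List.length_append] at h' ⊢; omega

-- A computes "not Nodup"
lemma repA_eq (str_num : String) :
    rep_digits str_num = !decide str_num.toList.Nodup := by
  unfold rep_digits
  rw [foldA_pair _ [] 0 (by simp)]
  rw [PySem.Str.len_eq]
  have h := foldAdd_len_iff str_num.toList []
  simp only [List.length_nil, Nat.zero_add, List.not_mem_nil, not_false_iff,
    implies_true, and_true] at h
  by_cases hnd : str_num.toList.Nodup
  · simp [h.mpr hnd, hnd]
  · have hne : (str_num.toList.foldl PySem.Set.add []).length ≠ str_num.toList.length := by
      intro he; exact hnd (h.mp he)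
    have hle := foldAdd_le str_num.toList []
    simp only [List.length_nil, Nat.zero_add] at hle
    simp [hnd]
    rw [String.length_toList] at hle hne
    omega

-- adjacent-equal scan on a (· ≤ ·)-sorted list detects exactly "not Nodup"
lemma adj_scan (s : List Char) (hs : s.Pairwise (· ≤ ·)) :
    ((s.zip s.tail).any (fun p => p.1 == p.2)) = !decide s.Nodup := by
  induction s with
  | nil => simp
  | cons a t ih =>
    cases t with
    | nil => simp
    | cons b t' =>
      have hpt : (b :: t').Pairwise (· ≤ ·) := (List.pairwise_cons.mp hs).2
      have hab : a ≤ b := (List.pairwise_cons.mp hs).1 b (List.mem_cons_self)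
      by_cases hEq : a = b
      · subst hEq
        simp [List.zip, List.any_cons]
      · have hIH := ih hpt
        simp only [List.tail_cons] at hIH ⊢
        have hlt : a < b := lt_of_le_of_ne hab hEq
        have hnotin : a ∉ b :: t' := by
          intro hmem
          rcases List.mem_cons.mp hmem with rfl | hm
          · exact hEq rfl
          · have hble : ∀ y ∈ t', b ≤ y := fun y hy =>
              (List.pairwise_cons.mp hpt).1 y hy
            exact absurd (lt_of_lt_of_le hlt (hble a hm)) (lt_irrefl a)
        simp only [List.zip] at hIH
        simp only [List.zip, List.zipWith_cons_cons, List.any_cons]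
        rw [hIH]
        simp [List.nodup_cons, hnotin, hEq]

-- B computes "not Nodup" too
lemma repB_eq (str_num : String) :
    rep_digits_alt str_num = !decide str_num.toList.Nodup := by
  unfold rep_digits_alt pvAdjDup
  rw [PySem.List.slice_from_one]
  set s := PySem.List.sorted str_num.toList (fun c => c) false with hsdef
  have hpw : s.Pairwise (· ≤ ·) := by
    simpa using PySem.List.sorted_pairwise str_num.toList (fun c => c)
  have hperm : s.Perm str_num.toList := PySem.List.sorted_perm _ _ _
  rw [adj_scan s hpw]
  simp [hperm.nodup_iff]

-- ===== VERDICT (by name: the statement is the Claim_ definition above) =====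
theorem rep_digits_spec : Claim_equal_rep_digits := by
  intro s _
  unfold Spec_rep_digits
  rw [repA_eq, repB_eq]
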